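-- pv_equiv track=rewrite | github.com/kapow-dc-uba-ar/poisson | poisson/analysis/prefix.py | prefix_distribution
-- ===== SOURCE A (Python) =====
-- def prefix_distribution(occurrence_dict, prefix_length):
--     prefix_occurrences = dict()
--     for word in occurrence_dict:
--         if len(word) >= prefix_length:
--             prefix = word[:prefix_length]
--             if prefix in prefix_occurrences:
--                 prefix_occurrences[prefix] += occurrence_dict[word]
--             else:
--                 prefix_occurrences[prefix] = occurrence_dict[word]
--     return prefix_occurrences
-- ===== SOURCE B (Python) =====
-- def prefix_distribution(occurrence_dict, prefix_length):
--     # Two-phase: collect the distinct prefixes in first-occurrence order,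
--     # then build each prefix's total with one sum over the qualifying items.
--     items = [(w, v) for w, v in occurrence_dict.items() if len(w) >= prefix_length]
--     prefixes = list(dict.fromkeys(w[:prefix_length] for w, _ in items))
--     return {p: sum(v for w, v in items if w[:prefix_length] == p) for p in prefixes}
-- ===== Notes on version B (the rewrite author's own statement) =====
-- stated objective: alternative
-- what changed: replaces A's single-pass running-total dict update with a two-phase scheme: dedup the prefixes in first-occurrence order, then compute each prefix's total with an independent sum over the filtered items (no incremental dict mutation); Pre_ excludes association lists with duplicate keys, which cannot arise from a real Python dict argument and whose first-match-lookup reading is accidental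
import Mathlib
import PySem

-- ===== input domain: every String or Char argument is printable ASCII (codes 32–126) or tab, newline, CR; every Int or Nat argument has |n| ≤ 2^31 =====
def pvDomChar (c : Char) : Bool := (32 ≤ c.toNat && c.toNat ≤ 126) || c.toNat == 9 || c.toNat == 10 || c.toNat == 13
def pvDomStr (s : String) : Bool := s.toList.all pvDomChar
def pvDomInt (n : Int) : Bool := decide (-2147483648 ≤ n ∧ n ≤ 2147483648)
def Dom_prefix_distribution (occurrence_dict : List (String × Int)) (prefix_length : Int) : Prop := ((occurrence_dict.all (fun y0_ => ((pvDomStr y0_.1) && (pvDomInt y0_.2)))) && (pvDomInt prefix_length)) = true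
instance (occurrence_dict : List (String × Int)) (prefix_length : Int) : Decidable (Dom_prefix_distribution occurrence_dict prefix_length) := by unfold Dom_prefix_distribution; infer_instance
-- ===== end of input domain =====

-- B replaces A's single-pass running-total dict with dedup-the-prefixes + an independent sum per prefix (alternative decomposition, same asymptotics up to the number of prefixes).


-- ===== PORT A =====
-- 'for word in occurrence_dict' iterates the keys; 'occurrence_dict[word]' is the dict lookup (first match).
def prefix_distribution (occurrence_dict : List (String × Int)) (prefix_length : Int) : List (String × Int) :=
  (occurrence_dict.foldl (fun acc wv =>
      if prefix_length ≤ PySem.Str.len wv.1 then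
        let p := PySem.Str.slice wv.1 none (some prefix_length)
        let v := ((PySem.Dict.mk occurrence_dict).get? wv.1).getD 0   -- occurrence_dict[word]; always present
        if acc.contains p then acc.insert p (acc.getD p 0 + v)
        else acc.insert p v
      else acc)
    (PySem.Dict.empty : PySem.Dict String Int)).items

-- ===== PORT B =====
def prefix_distribution_alt (occurrence_dict : List (String × Int)) (prefix_length : Int) : List (String × Int) :=
  let items := occurrence_dict.filter (fun wv => prefix_length ≤ PySem.Str.len wv.1)
  let prefixes := PySem.List.dedup (items.map (fun wv => PySem.Str.slice wv.1 none (some prefix_length)))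
  prefixes.map (fun p =>
    (p, ((items.filter (fun wv => PySem.Str.slice wv.1 none (some prefix_length) == p)).map (·.2)).sum))

-- ===== PRECONDITION & SPEC =====
-- Pre_ excludes association lists with duplicate keys: a real Python dict argument never has them,
-- and on such lists A's first-match lookup reading is accidental.
def Pre_prefix_distribution (occurrence_dict : List (String × Int)) (prefix_length : Int) : Prop :=
  (occurrence_dict.map Prod.fst).Nodup
instance (occurrence_dict : List (String × Int)) (prefix_length : Int) : Decidable (Pre_prefix_distribution occurrence_dict prefix_length) := by unfold Pre_prefix_distribution; infer_instance
def pvWitness_prefix_distribution : (List (String × Int)) × Int := ([("ab", 2), ("ac", 3), ("b", 5)], 1)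

def Spec_prefix_distribution (occurrence_dict : List (String × Int)) (prefix_length : Int) (out : List (String × Int)) : Prop := out = prefix_distribution_alt occurrence_dict prefix_length
instance (occurrence_dict : List (String × Int)) (prefix_length : Int) (out : List (String × Int)) : Decidable (Spec_prefix_distribution occurrence_dict prefix_length out) := by unfold Spec_prefix_distribution; infer_instance

-- ===== CLAIM (what is proved, stated in full; the proofs are below) =====
def Claim_equal_prefix_distribution : Prop := ∀ (occurrence_dict : List (String × Int)) (prefix_length : Int), Dom_prefix_distribution occurrence_dict prefix_length → Pre_prefix_distribution occurrence_dict prefix_length → Spec_prefix_distribution occurrence_dict prefix_length (prefix_distribution occurrence_dict prefix_length)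

-- ===== LEMMAS AND PROOFS =====

-- the step function of A's loop, abstracted over the qualifying test q and the prefix map pre
-- (A's always-succeeding dict lookup is already replaced by the pair's own value wv.2)
def pvStep (q : String × Int → Bool) (pre : String × Int → String)
    (acc : PySem.Dict String Int) (wv : String × Int) : PySem.Dict String Int :=
  if q wv then
    if acc.contains (pre wv) then acc.insert (pre wv) (acc.getD (pre wv) 0 + wv.2)
    else acc.insert (pre wv) wv.2
  else acc

lemma pv_dedup_append (xs : List String) (x : String) :
    PySem.List.dedup (xs ++ [x]) = PySem.Set.add (PySem.List.dedup xs) x := by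
  simp [PySem.List.dedup_eq_ofList, PySem.Set.ofList_eq_foldl, List.foldl_append]

lemma pv_loop_items (q : String × Int → Bool) (pre : String × Int → String)
    (l : List (String × Int)) :
    (l.foldl (pvStep q pre) (PySem.Dict.empty : PySem.Dict String Int)).items
      = (PySem.List.dedup ((l.filter q).map pre)).map
          (fun p => (p, (((l.filter q).filter (fun wv => pre wv == p)).map (·.2)).sum)) := by
  induction l using List.reverseRecOn with
  | nil => rfl
  | append_singleton l x ih =>
    simp only [List.foldl_append, List.foldl_cons, List.foldl_nil, List.filter_append,
      List.map_append]
    set d := l.foldl (pvStep q pre) (PySem.Dict.empty : PySem.Dict String Int) with hd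
    set P := l.filter q with hP
    set D := PySem.List.dedup (P.map pre) with hD
    set F : String → Int := fun p => (((P.filter (fun wv => pre wv == p)).map (·.2)).sum)
      with hF
    have hitems : d.items = D.map (fun p => (p, F p)) := ih
    have hkeys : d.keys = D := by
      show d.items.map (·.1) = D
      rw [hitems, List.map_map]
      exact List.map_id' D
    have hnd : d.keys.Nodup := by rw [hkeys]; exact PySem.List.nodup_dedup _
    by_cases hq : q x = true
    · have hfx : List.filter q [x] = [x] := by simp [List.filter_singleton, hq]
      rw [hfx]
      have hmapx : List.map pre [x] = [pre x] := rfl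
      rw [hmapx, pv_dedup_append]
      by_cases hp : pre x ∈ D
      · have hcont : d.contains (pre x) = true := by
          rw [PySem.Dict.contains_iff_mem_keys, hkeys]; exact hp
        have hmemit : (pre x, F (pre x)) ∈ d.items := by
          rw [hitems]; exact List.mem_map_of_mem hp
        have hgetD : d.getD (pre x) 0 = F (pre x) :=
          PySem.Dict.getD_of_mem_items d hmemit hnd 0
        have hadd : PySem.Set.add D (pre x) = D := by
          simp [PySem.Set.add, PySem.Set.contains, hp]
        rw [hadd]
        simp only [pvStep, hq, if_true, hcont, hgetD]
        rw [PySem.Dict.items_insert_of_contains d _ hcont, hitems, List.map_map]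
        apply List.map_congr_left
        intro p hpD
        by_cases hpe : p = pre x
        · subst hpe
          simp [hF, List.filter_append, List.filter_singleton, List.sum_append]
        · have h1 : (p == pre x) = false := by simp [hpe]
          have h2 : (pre x == p) = false := by simp [Ne.symm hpe]
          simp [Function.comp, h1, h2, hF, List.filter_append, List.filter_singleton,
            List.sum_append]
      · have hcont : d.contains (pre x) = false := by
          rw [Bool.eq_false_iff]
          intro h
          exact hp (by rw [← hkeys]; exact (PySem.Dict.contains_iff_mem_keys _ _).mp h)
        have hadd : PySem.Set.add D (pre x) = D ++ [pre x] := by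
          simp [PySem.Set.add, PySem.Set.contains, hp]
        rw [hadd]
        simp only [pvStep, hq, if_true, hcont, Bool.false_eq_true, if_false]
        rw [PySem.Dict.items_insert_of_not_contains d _ hcont, hitems, List.map_append]
        have hemp : P.filter (fun wv => pre wv == (pre x)) = [] := by
          apply List.filter_eq_nil_iff.mpr
          intro wv hwv
          simp only [beq_iff_eq]
          intro he
          exact hp (by
            rw [hD]
            exact (PySem.List.mem_dedup _ _).mpr (he ▸ List.mem_map_of_mem hwv))
        congr 1
        · apply List.map_congr_left
          intro p hpD
          have h2 : (pre x == p) = false := by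
            simp only [beq_eq_false_iff_ne]
            intro he; exact hp (he ▸ hpD)
          simp [hF, List.filter_append, List.filter_singleton, List.sum_append, h2]
        · simp [hF, List.filter_append, List.filter_singleton, List.sum_append, hemp]
    · have hqf : q x = false := by simpa using hq
      have hfx : List.filter q [x] = [] := by simp [List.filter_singleton, hqf]
      rw [hfx]
      simpa [pvStep, hqf] using ih

theorem prefix_distribution_spec : Claim_equal_prefix_distribution := by
  intro d L _ hpre
  unfold Spec_prefix_distribution prefix_distribution prefix_distribution_alt
  have hstep : d.foldl (fun acc wv =>
      if L ≤ PySem.Str.len wv.1 then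
        let p := PySem.Str.slice wv.1 none (some L)
        let v := ((PySem.Dict.mk d).get? wv.1).getD 0
        if acc.contains p then acc.insert p (acc.getD p 0 + v)
        else acc.insert p v
      else acc) (PySem.Dict.empty : PySem.Dict String Int)
      = d.foldl (pvStep (fun wv => decide (L ≤ PySem.Str.len wv.1))
          (fun wv => PySem.Str.slice wv.1 none (some L)))
          (PySem.Dict.empty : PySem.Dict String Int) := by
    apply PySem.List.foldl_congr_mem
    intro acc wv hwv
    have hget : (PySem.Dict.mk d).get? wv.1 = some wv.2 :=
      PySem.Dict.get?_of_mem_items (PySem.Dict.mk d) hwv hpre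
    simp [pvStep, hget]
  rw [hstep, pv_loop_items]
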